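-- pv_equiv track=rewrite | github.com/mackadrian/MRU-python | Assignment 4/asg4.py | get_glass_score
-- ===== SOURCE A (Python) =====
-- def get_glass_score(levels: list) -> int:
--     """
--     Calculates the score of glass dice by checking condition directly in column.
--     """
--     score = 0
--     for row in levels:
--         for column in row:
--             if "G1" in column:
--                 score += 1
--             elif "G2" in column:
--                 score += 2
--             elif "G3" in column:
--                 score += 3
--             elif "G4" in column:
--                 score += 4
--             elif "G5" in column:
--                 score += 5
--             elif "G6" in column:
--                 score += 6
--     return score
-- ===== SOURCE B (Python) =====
-- def get_glass_score(levels: list) -> int: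
--     """Sum per-cell glass scores: a cell contributes the smallest d in 1..6 such
--     that the exact string "Gd" is an element of the cell (0 if none).  Instead of
--     probing the cell for each candidate tag, scan the cell's strings once, parse
--     each string that has the shape 'G'+digit, and keep the minimum die value."""
--     total = 0
--     for row in levels:
--         for column in row:
--             best = 0
--             for s in column:
--                 if len(s) == 2 and s[0] == "G":
--                     d = ord(s[1]) - ord("0")
--                     if 1 <= d <= 6 and (best == 0 or d < best):
--                         best = d
--             total += best
--     return total
-- ===== Notes on version B (the rewrite author's own statement) =====
-- stated objective: alternative
-- what changed: Instead of probing each cell six times for the candidate tags G1..G6 (membership tests), B makes a single data-driven pass over the cell's strings, parsing each 'G'+digit string and maintaining the running minimum die value.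
import Mathlib
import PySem

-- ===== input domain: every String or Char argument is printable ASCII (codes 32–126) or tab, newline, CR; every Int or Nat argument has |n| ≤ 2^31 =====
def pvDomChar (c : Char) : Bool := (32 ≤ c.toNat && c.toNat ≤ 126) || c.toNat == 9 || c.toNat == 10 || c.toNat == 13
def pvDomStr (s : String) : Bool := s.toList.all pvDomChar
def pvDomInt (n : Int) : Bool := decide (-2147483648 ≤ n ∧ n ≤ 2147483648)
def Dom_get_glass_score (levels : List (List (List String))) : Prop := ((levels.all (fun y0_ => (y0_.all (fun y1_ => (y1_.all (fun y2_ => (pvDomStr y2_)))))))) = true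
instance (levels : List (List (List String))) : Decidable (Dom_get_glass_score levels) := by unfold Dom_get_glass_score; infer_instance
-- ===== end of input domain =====

-- B replaces A's six membership probes per cell by one data-driven pass over the cell's
-- strings, parsing each 'G'+digit string and keeping the minimum die value (alternative).

-- ===== PORT A =====
def get_glass_score (levels : List (List (List String))) : Int :=
  levels.foldl (fun score row =>
    row.foldl (fun score column =>
      if "G1" ∈ column then score + 1
      else if "G2" ∈ column then score + 2
      else if "G3" ∈ column then score + 3
      else if "G4" ∈ column then score + 4
      else if "G5" ∈ column then score + 5
      else if "G6" ∈ column then score + 6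
      else score) score) 0

-- ===== PORT B =====
-- inner loop body of Source B: 'if len(s)==2 and s[0]=="G": d = ord(s[1])-ord("0"); if 1<=d<=6 and (best==0 or d<best): best = d'
-- (s[1] is accessed only under len(s)==2, so the Option.elim default is unreachable)
def pvDieStep (best : Int) (s : String) : Int :=
  if PySem.Str.len s = 2 ∧ PySem.Str.pyGet? s 0 = some 'G' then
    (PySem.Str.pyGet? s 1).elim best (fun c =>
      let d : Int := (c.toNat : Int) - 48
      if (1 ≤ d ∧ d ≤ 6) ∧ (best = 0 ∨ d < best) then d else best)
  else best

def get_glass_score_alt (levels : List (List (List String))) : Int :=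
  levels.foldl (fun total row =>
    row.foldl (fun total column =>
      total + column.foldl pvDieStep 0) total) 0

-- ===== PRECONDITION & SPEC =====
def Spec_get_glass_score (levels : List (List (List String))) (out : Int) : Prop := out = get_glass_score_alt levels
instance (levels : List (List (List String))) (out : Int) : Decidable (Spec_get_glass_score levels out) := by unfold Spec_get_glass_score; infer_instance

-- ===== CLAIM (what is proved, stated in full; the proofs are below) =====
def Claim_equal_get_glass_score : Prop := ∀ (levels : List (List (List String))), Dom_get_glass_score levels → Spec_get_glass_score levels (get_glass_score levels)

-- ===== LEMMAS AND PROOFS =====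

-- proof-side abbreviations: the die value of one string, min with 0 acting as "none yet",
-- and the per-cell score as A computes it
def pvVal (s : String) : Int :=
  if s = "G1" then 1 else if s = "G2" then 2 else if s = "G3" then 3
  else if s = "G4" then 4 else if s = "G5" then 5 else if s = "G6" then 6 else 0

def pvMinI (b d : Int) : Int := if d ≠ 0 ∧ (b = 0 ∨ d < b) then d else b

def pvCasc (c : List String) : Int :=
  if "G1" ∈ c then 1 else if "G2" ∈ c then 2 else if "G3" ∈ c then 3
  else if "G4" ∈ c then 4 else if "G5" ∈ c then 5 else if "G6" ∈ c then 6 else 0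

lemma pvChar_eq_of_toNat {c : Char} {d : Char} (h : c.toNat = d.toNat) : c = d := by
  apply Char.ext
  exact UInt32.toNat_inj.mp h

lemma pvStep_eq (b : Int) (s : String) : pvDieStep b s = pvMinI b (pvVal s) := by
  unfold pvDieStep
  rw [PySem.Str.len_eq,
      show (0:Int) = ((0:Nat):Int) from rfl, PySem.Str.pyGet?_natCast,
      show (1:Int) = ((1:Nat):Int) from rfl, PySem.Str.pyGet?_natCast]
  by_cases hlen : s.toList.length = 2
  case neg =>
    have hval : pvVal s = 0 := by
      unfold pvVal
      rw [if_neg, if_neg, if_neg, if_neg, if_neg, if_neg] <;>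
        (intro he; apply hlen; rw [he]; decide)
    rw [hval, if_neg (by rintro ⟨hc, -⟩; exact hlen (by exact_mod_cast hc))]
    simp [pvMinI]
  case pos =>
    obtain ⟨c0, c1, hl⟩ := List.length_eq_two.mp hlen
    by_cases hG : c0 = 'G'
    case neg =>
      have hval : pvVal s = 0 := by
        unfold pvVal
        rw [if_neg, if_neg, if_neg, if_neg, if_neg, if_neg] <;>
          (intro he; rw [he] at hl; simp at hl; exact hG hl.1.symm)
      rw [hval, hl, if_neg (by rintro ⟨-, hc⟩; simp at hc; exact hG hc)]
      simp [pvMinI]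
    case pos =>
      subst hG
      have hes : ∀ (k : Char) (u : String), u.toList = ['G', k] → c1 = k → s = u := by
        intro k u hu hk
        exact String.toList_inj.mp (by rw [hl, hu, hk])
      have hns : ∀ (k : Char) (u : String), u.toList = ['G', k] → c1 ≠ k → s ≠ u := by
        intro k u hu hk he
        rw [he, hu] at hl
        simp at hl
        exact hk hl.symm
      by_cases h1 : c1 = '1'
      · subst h1; rw [hl]
        unfold pvVal
        rw [if_pos (hes '1' "G1" (by decide) rfl), if_pos ⟨by decide, by decide⟩]
        rw [show ((['G', '1'][(1:Nat)]?) = some '1') from rfl, Option.elim_some]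
        unfold pvMinI
        rw [show ((('1').toNat : Int) - 48) = (1:Int) from by decide]
        dsimp only
        split_ifs <;> omega
      by_cases h2 : c1 = '2'
      · subst h2; rw [hl]
        unfold pvVal
        rw [if_neg (hns '1' "G1" (by decide) (by decide)),
            if_pos (hes '2' "G2" (by decide) rfl), if_pos ⟨by decide, by decide⟩]
        rw [show ((['G', '2'][(1:Nat)]?) = some '2') from rfl, Option.elim_some]
        unfold pvMinI
        rw [show ((('2').toNat : Int) - 48) = (2:Int) from by decide]
        dsimp only
        split_ifs <;> omega
      by_cases h3 : c1 = '3'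
      · subst h3; rw [hl]
        unfold pvVal
        rw [if_neg (hns '1' "G1" (by decide) (by decide)),
            if_neg (hns '2' "G2" (by decide) (by decide)),
            if_pos (hes '3' "G3" (by decide) rfl), if_pos ⟨by decide, by decide⟩]
        rw [show ((['G', '3'][(1:Nat)]?) = some '3') from rfl, Option.elim_some]
        unfold pvMinI
        rw [show ((('3').toNat : Int) - 48) = (3:Int) from by decide]
        dsimp only
        split_ifs <;> omega
      by_cases h4 : c1 = '4'
      · subst h4; rw [hl]
        unfold pvVal
        rw [if_neg (hns '1' "G1" (by decide) (by decide)),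
            if_neg (hns '2' "G2" (by decide) (by decide)),
            if_neg (hns '3' "G3" (by decide) (by decide)),
            if_pos (hes '4' "G4" (by decide) rfl), if_pos ⟨by decide, by decide⟩]
        rw [show ((['G', '4'][(1:Nat)]?) = some '4') from rfl, Option.elim_some]
        unfold pvMinI
        rw [show ((('4').toNat : Int) - 48) = (4:Int) from by decide]
        dsimp only
        split_ifs <;> omega
      by_cases h5 : c1 = '5'
      · subst h5; rw [hl]
        unfold pvVal
        rw [if_neg (hns '1' "G1" (by decide) (by decide)),
            if_neg (hns '2' "G2" (by decide) (by decide)),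
            if_neg (hns '3' "G3" (by decide) (by decide)),
            if_neg (hns '4' "G4" (by decide) (by decide)),
            if_pos (hes '5' "G5" (by decide) rfl), if_pos ⟨by decide, by decide⟩]
        rw [show ((['G', '5'][(1:Nat)]?) = some '5') from rfl, Option.elim_some]
        unfold pvMinI
        rw [show ((('5').toNat : Int) - 48) = (5:Int) from by decide]
        dsimp only
        split_ifs <;> omega
      by_cases h6 : c1 = '6'
      · subst h6; rw [hl]
        unfold pvVal
        rw [if_neg (hns '1' "G1" (by decide) (by decide)),
            if_neg (hns '2' "G2" (by decide) (by decide)),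
            if_neg (hns '3' "G3" (by decide) (by decide)),
            if_neg (hns '4' "G4" (by decide) (by decide)),
            if_neg (hns '5' "G5" (by decide) (by decide)),
            if_pos (hes '6' "G6" (by decide) rfl), if_pos ⟨by decide, by decide⟩]
        rw [show ((['G', '6'][(1:Nat)]?) = some '6') from rfl, Option.elim_some]
        unfold pvMinI
        rw [show ((('6').toNat : Int) - 48) = (6:Int) from by decide]
        dsimp only
        split_ifs <;> omega
      · -- second char is not a die digit 1..6
        have hd : ¬ (1 ≤ (c1.toNat : Int) - 48 ∧ (c1.toNat : Int) - 48 ≤ 6) := by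
          rintro ⟨ha, hb⟩
          have h49 : 49 ≤ c1.toNat := by omega
          have h54 : c1.toNat ≤ 54 := by omega
          interval_cases h : c1.toNat
          · exact h1 (pvChar_eq_of_toNat (by rw [h]; rfl))
          · exact h2 (pvChar_eq_of_toNat (by rw [h]; rfl))
          · exact h3 (pvChar_eq_of_toNat (by rw [h]; rfl))
          · exact h4 (pvChar_eq_of_toNat (by rw [h]; rfl))
          · exact h5 (pvChar_eq_of_toNat (by rw [h]; rfl))
          · exact h6 (pvChar_eq_of_toNat (by rw [h]; rfl))
        rw [hl]
        unfold pvVal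
        rw [if_neg (hns '1' "G1" (by decide) h1),
            if_neg (hns '2' "G2" (by decide) h2),
            if_neg (hns '3' "G3" (by decide) h3),
            if_neg (hns '4' "G4" (by decide) h4),
            if_neg (hns '5' "G5" (by decide) h5),
            if_neg (hns '6' "G6" (by decide) h6),
            if_pos ⟨by norm_num, rfl⟩]
        rw [show ((['G', c1][(1:Nat)]?) = some c1) from rfl, Option.elim_some,
            if_neg (by rintro ⟨hc, -⟩; exact hd hc)]
        simp [pvMinI]

lemma pvMinI_assoc (b x y : Int) : pvMinI (pvMinI b x) y = pvMinI b (pvMinI x y) := by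
  unfold pvMinI; split_ifs <;> omega

set_option maxHeartbeats 1600000 in
lemma pvCasc_cons (s : String) (t : List String) :
    pvCasc (s :: t) = pvMinI (pvVal s) (pvCasc t) := by
  unfold pvCasc pvVal pvMinI
  simp only [List.mem_cons, eq_comm]
  by_cases hm1 : "G1" ∈ t
  · simp only [hm1, or_true, if_true]
    split_ifs <;> omega
  simp only [hm1, or_false, if_false]
  by_cases hm2 : "G2" ∈ t
  · simp only [hm2, or_true, if_true]
    split_ifs <;> omega
  simp only [hm2, or_false, if_false]
  by_cases hm3 : "G3" ∈ t
  · simp only [hm3, or_true, if_true]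
    split_ifs <;> omega
  simp only [hm3, or_false, if_false]
  by_cases hm4 : "G4" ∈ t
  · simp only [hm4, or_true, if_true]
    split_ifs <;> omega
  simp only [hm4, or_false, if_false]
  by_cases hm5 : "G5" ∈ t
  · simp only [hm5, or_true, if_true]
    split_ifs <;> omega
  simp only [hm5, or_false, if_false]
  by_cases hm6 : "G6" ∈ t
  · simp only [hm6, or_true, if_true]
    split_ifs <;> omega
  simp only [hm6, or_false, if_false]
  split_ifs <;> omega

lemma pvFold_eq (c : List String) : ∀ b : Int, c.foldl pvDieStep b = pvMinI b (pvCasc c) := by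
  induction c with
  | nil => intro b; simp [pvCasc, pvMinI]
  | cons s t ih =>
    intro b
    simp only [List.foldl]
    rw [pvStep_eq, ih, pvMinI_assoc, ← pvCasc_cons]

lemma pvCell_eq (score : Int) (c : List String) :
    (if "G1" ∈ c then score + 1
     else if "G2" ∈ c then score + 2
     else if "G3" ∈ c then score + 3
     else if "G4" ∈ c then score + 4
     else if "G5" ∈ c then score + 5
     else if "G6" ∈ c then score + 6
     else score) = score + c.foldl pvDieStep 0 := by
  rw [pvFold_eq]
  unfold pvCasc pvMinI
  split_ifs <;> omega

lemma pvRow_eq (row : List (List String)) : ∀ s : Int,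
    row.foldl (fun score column =>
      if "G1" ∈ column then score + 1
      else if "G2" ∈ column then score + 2
      else if "G3" ∈ column then score + 3
      else if "G4" ∈ column then score + 4
      else if "G5" ∈ column then score + 5
      else if "G6" ∈ column then score + 6
      else score) s
    = row.foldl (fun total column => total + column.foldl pvDieStep 0) s := by
  induction row with
  | nil => intro s; rfl
  | cons c t ih => intro s; simp only [List.foldl]; rw [pvCell_eq, ih]

-- ===== VERDICT (by name: the statement is the Claim_ definition above) =====
theorem get_glass_score_spec : Claim_equal_get_glass_score := by
  intro levels _
  unfold Spec_get_glass_score get_glass_score get_glass_score_alt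
  have aux : ∀ (t : List (List (List String))) (s : Int),
      t.foldl (fun score row =>
        row.foldl (fun score column =>
          if "G1" ∈ column then score + 1
          else if "G2" ∈ column then score + 2
          else if "G3" ∈ column then score + 3
          else if "G4" ∈ column then score + 4
          else if "G5" ∈ column then score + 5
          else if "G6" ∈ column then score + 6
          else score) score) s
      = t.foldl (fun total row => row.foldl (fun total column => total + column.foldl pvDieStep 0) total) s := by
    intro t
    induction t with
    | nil => intro s; rfl
    | cons r t2 ih => intro s; simp only [List.foldl]; rw [pvRow_eq, ih]
  exact aux levels 0
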